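-- pv_equiv track=rewrite | github.com/Imene-ka/opencv | algo_RLE.py | recuperation
-- ===== SOURCE A (Python) =====
-- def recuperation(d) :
--     result = []
--     val = 0
--     i = 0
--     while i < len(d) :
--         if d[i] == 255 :
--             while d[i] == 255 :
--                  val = val + d[i]
--                  i = i + 1
--             result.append(val+d[i])
--             val = 0
--         else :
--             result.append(d[i])
--         i = i + 1
--     return result
-- ===== SOURCE B (Python) =====
-- def recuperation(d):
--     result = []
--     acc = 0
--     for x in d:
--         if x == 255:
--             acc += x
--         else:
--             result.append(acc + x)
--             acc = 0
--     if acc: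
--         result.append(acc)
--     return result
-- ===== Notes on version B (the rewrite author's own statement) =====
-- stated objective: simpler
-- what changed: one flat pass over the elements with an integer run-accumulator replaces A's index-based outer loop containing a nested unbounded inner while
import Mathlib
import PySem

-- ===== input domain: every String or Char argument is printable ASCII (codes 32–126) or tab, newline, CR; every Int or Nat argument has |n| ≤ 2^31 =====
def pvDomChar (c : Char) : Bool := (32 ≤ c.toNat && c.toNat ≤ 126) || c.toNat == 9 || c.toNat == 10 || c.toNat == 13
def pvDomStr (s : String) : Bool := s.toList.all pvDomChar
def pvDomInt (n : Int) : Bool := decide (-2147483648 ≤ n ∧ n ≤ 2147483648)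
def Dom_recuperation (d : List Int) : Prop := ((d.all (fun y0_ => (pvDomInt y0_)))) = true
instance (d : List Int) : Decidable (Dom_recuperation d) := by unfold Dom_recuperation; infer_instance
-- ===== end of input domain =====

-- B replaces A's nested inner while by one flat pass with a run-accumulator (objective: simpler).
-- ===== PORT A =====
-- inner 'while d[i] == 255: val += d[i]; i += 1'.  Out-of-range d[i] is read as 0 (Python
-- raises IndexError there; those inputs are excluded by Pre_recuperation below).
def recupInnerA (d : List Int) (val : Int) (i : Nat) : Int × Nat :=
  if d.getD i 0 = 255 then recupInnerA d (val + d.getD i 0) (i + 1) else (val, i)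
termination_by d.length - i
decreasing_by
  rename_i h
  have hi : i < d.length := by
    by_contra hc
    rw [List.getD_eq_default _ _ (by omega)] at h
    exact absurd h (by norm_num)
  omega

theorem recupInnerA_le (d : List Int) (val : Int) (i : Nat) : i ≤ (recupInnerA d val i).2 := by
  fun_induction recupInnerA with
  | case1 val i h ih => omega
  | case2 => simp

-- the outer 'while i < len(d)' loop of A
def recupGoA (d : List Int) (result : List Int) (val : Int) (i : Nat) : List Int :=
  if _h : i < d.length then
    if d.getD i 0 = 255 then
      let p := recupInnerA d val i
      recupGoA d (result ++ [p.1 + d.getD p.2 0]) 0 (p.2 + 1)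
    else
      recupGoA d (result ++ [d.getD i 0]) val (i + 1)
  else result
termination_by d.length - i
decreasing_by
  · have := recupInnerA_le d val i; omega
  · omega

def recuperation (d : List Int) : List Int := recupGoA d [] 0 0

-- ===== PORT B =====
-- 'for x in d' body of Source B
def recupGoB (d : List Int) (acc : Int) (result : List Int) : List Int :=
  match d with
  | [] => if acc ≠ 0 then result ++ [acc] else result   -- trailing 'if acc: result.append(acc)'
  | x :: rest =>
      if x = 255 then recupGoB rest (acc + x) result
      else recupGoB rest 0 (result ++ [acc + x])

def recuperation_alt (d : List Int) : List Int := recupGoB d 0 []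

-- ===== PRECONDITION & SPEC =====
-- Pre_ excludes exactly the lists whose last element is 255: on those Python A's inner
-- while reads past the end and raises IndexError (B returns the accumulated run appended).
def Pre_recuperation (d : List Int) : Prop := d.getLast? ≠ some 255
instance (d : List Int) : Decidable (Pre_recuperation d) := by unfold Pre_recuperation; infer_instance
def pvWitness_recuperation : List Int := [255, 3, 7]

def Spec_recuperation (d : List Int) (out : List Int) : Prop := out = recuperation_alt d
instance (d : List Int) (out : List Int) : Decidable (Spec_recuperation d out) := by unfold Spec_recuperation; infer_instance

-- ===== CLAIM (what is proved, stated in full; the proofs are below) =====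
def Claim_equal_recuperation : Prop := ∀ (d : List Int), Dom_recuperation d → Pre_recuperation d → Spec_recuperation d (recuperation d)

-- ===== LEMMAS AND PROOFS =====

-- common reference function: B without its result accumulator
def recupSpec (d : List Int) (acc : Int) : List Int :=
  match d with
  | [] => if acc ≠ 0 then [acc] else []
  | x :: rest => if x = 255 then recupSpec rest (acc + x) else (acc + x) :: recupSpec rest 0

theorem recupGoB_eq (d : List Int) (acc : Int) (result : List Int) :
    recupGoB d acc result = result ++ recupSpec d acc := by
  induction d generalizing acc result with
  | nil => simp [recupGoB, recupSpec]; split <;> simp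
  | cons x rest ih => simp only [recupGoB, recupSpec]; split <;> simp [ih]

theorem getD_of_lt (d : List Int) (i : Nat) (h : i < d.length) :
    d.getD i 0 = d[i] := by
  rw [List.getD_eq_getElem?_getD, List.getElem?_eq_getElem h]; rfl

theorem recupInnerA_stop (d : List Int) (val : Int) (i : Nat) :
    d.getD (recupInnerA d val i).2 0 ≠ 255 := by
  fun_induction recupInnerA with
  | case1 val i h ih => exact ih
  | case2 val i h => simpa using h

-- the run sub-lemma: inner-while steps match recupSpec's 255 steps
theorem recupInnerA_spec (d : List Int) (val : Int) (i : Nat) :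
    recupSpec (d.drop i) val
      = recupSpec (d.drop (recupInnerA d val i).2) (recupInnerA d val i).1 := by
  fun_induction recupInnerA with
  | case2 => rfl
  | case1 val i h ih =>
    have hi : i < d.length := by
      by_contra hc
      rw [List.getD_eq_default _ _ (by omega)] at h
      exact absurd h (by norm_num)
    have hx : d[i] = (255 : Int) := by rw [← getD_of_lt d i hi]; exact h
    rw [List.drop_eq_getElem_cons hi]
    rw [h] at ih ⊢
    simpa [recupSpec, hx] using ih

-- the inner while never runs to the end when the list does not end in 255
theorem recupInnerA_lt (d : List Int) (val : Int) (i : Nat)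
    (h255 : d.getD i 0 = 255) (hpre : d.getLast? ≠ some 255) :
    (recupInnerA d val i).2 < d.length := by
  fun_induction recupInnerA with
  | case2 val i h => exact absurd h255 h
  | case1 val i h ih =>
    have hi : i < d.length := by
      by_contra hc
      rw [List.getD_eq_default _ _ (by omega)] at h
      exact absurd h (by norm_num)
    by_cases hnext : d.getD (i+1) 0 = 255
    · exact ih hnext
    · rw [recupInnerA, if_neg hnext]
      by_cases hlen : i + 1 < d.length
      · simpa using hlen
      · -- then i is the last index and d[i] = 255, contradicting Pre
        exfalso
        have hx : d[i] = (255 : Int) := by rw [← getD_of_lt d i hi]; exact h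
        have hl : i = d.length - 1 := by omega
        have : d.getLast? = some 255 := by
          rw [List.getLast?_eq_getElem?, ← hl, List.getElem?_eq_getElem hi, hx]
        exact hpre this

-- main invariant for A's outer loop
theorem recupGoA_eq (d : List Int) (hpre : d.getLast? ≠ some 255) :
    ∀ (i : Nat) (result : List Int),
      recupGoA d result 0 i = result ++ recupSpec (d.drop i) 0 := by
  intro i
  induction hn : d.length - i using Nat.strong_induction_on generalizing i with
  | _ n ih =>
  intro result
  rw [recupGoA]
  by_cases hi : i < d.length
  · simp only [dif_pos hi]
    by_cases h255 : d.getD i 0 = 255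
    · simp only [if_pos h255]
      have hj := recupInnerA_lt d 0 i h255 hpre
      have hij := recupInnerA_le d 0 i
      set p := recupInnerA d 0 i with hp
      have hstop := recupInnerA_stop d 0 i
      rw [← hp] at hstop
      have hsp : recupSpec (d.drop i) 0 = recupSpec (d.drop p.2) p.1 := recupInnerA_spec d 0 i
      rw [List.drop_eq_getElem_cons hj] at hsp
      have hne : d[p.2] ≠ 255 := by rw [getD_of_lt d p.2 hj] at hstop; exact hstop
      rw [ih (d.length - (p.2 + 1)) (by omega) (p.2 + 1) rfl]
      rw [hsp]
      simp [recupSpec, hne, List.getD_eq_getElem?_getD, List.getElem?_eq_getElem hj]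
    · simp only [if_neg h255]
      rw [ih (d.length - (i + 1)) (by omega) (i + 1) rfl]
      rw [List.drop_eq_getElem_cons hi]
      simp [recupSpec, List.getD_eq_getElem?_getD, List.getElem?_eq_getElem hi,
            getD_of_lt d i hi ▸ h255]
  · simp only [dif_neg hi]
    rw [List.drop_eq_nil_of_le (by omega)]
    simp [recupSpec]

-- ===== VERDICT (by name: the statement is the Claim_ definition above) =====
theorem recuperation_spec : Claim_equal_recuperation := by
  intro d _ hpre
  unfold Spec_recuperation recuperation recuperation_alt
  rw [recupGoB_eq, recupGoA_eq d hpre 0]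
  simp
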